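-- pv_equiv track=rewrite | github.com/ShathaVarsha/Multimodal-Mental-Health-Screening-System-using-Text-and-Video-Cues-DAIC-WOZ-Dataset- | backend/services/llm_service.py | _analyze_pronouns
-- ===== SOURCE A (Python) =====
-- from typing import Dict, List, Optional
--
-- def _analyze_pronouns(tokens: List[str]) -> Dict:
--     """Analyze pronoun usage patterns"""
--     first_person = ['i', 'me', 'my', 'mine', 'we', 'us', 'our', 'ours']
--     second_person = ['you', 'your', 'yours']
--     third_person = ['he', 'she', 'it', 'they', 'him', 'her', 'them', 'his', 'her', 'their', 'theirs']
--
--     first_count = sum(1 for t in tokens if t in first_person)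
--     second_count = sum(1 for t in tokens if t in second_person)
--     third_count = sum(1 for t in tokens if t in third_person)
--
--     total_pronouns = first_count + second_count + third_count
--
--     return {
--         'first_person_count': first_count,
--         'second_person_count': second_count,
--         'third_person_count': third_count,
--         'total_pronouns': total_pronouns
--     }
-- ===== SOURCE B (Python) =====
-- from typing import Dict, List, Optional
--
-- def _analyze_pronouns(tokens: List[str]) -> Dict:
--     """Analyze pronoun usage patterns (single pass via lookup table)"""
--     pronoun_category = {}
--     for p in ['i', 'me', 'my', 'mine', 'we', 'us', 'our', 'ours']:
--         pronoun_category[p] = 'first'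
--     for p in ['you', 'your', 'yours']:
--         pronoun_category[p] = 'second'
--     for p in ['he', 'she', 'it', 'they', 'him', 'her', 'them', 'his', 'their', 'theirs']:
--         pronoun_category[p] = 'third'
--
--     first_count = second_count = third_count = 0
--     for t in tokens:
--         cat = pronoun_category.get(t)
--         if cat == 'first':
--             first_count += 1
--         elif cat == 'second':
--             second_count += 1
--         elif cat == 'third':
--             third_count += 1
--
--     return {
--         'first_person_count': first_count,
--         'second_person_count': second_count,
--         'third_person_count': third_count,
--         'total_pronouns': first_count + second_count + third_count
--     }
-- ===== Notes on version B (the rewrite author's own statement) =====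
-- stated objective: faster
-- what changed: Replaces the three separate membership scans over the token list with one pronoun→category lookup table built once and a single pass over tokens incrementing the matching counter (one O(1) dict lookup per token instead of three linear list scans).
import Mathlib
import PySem

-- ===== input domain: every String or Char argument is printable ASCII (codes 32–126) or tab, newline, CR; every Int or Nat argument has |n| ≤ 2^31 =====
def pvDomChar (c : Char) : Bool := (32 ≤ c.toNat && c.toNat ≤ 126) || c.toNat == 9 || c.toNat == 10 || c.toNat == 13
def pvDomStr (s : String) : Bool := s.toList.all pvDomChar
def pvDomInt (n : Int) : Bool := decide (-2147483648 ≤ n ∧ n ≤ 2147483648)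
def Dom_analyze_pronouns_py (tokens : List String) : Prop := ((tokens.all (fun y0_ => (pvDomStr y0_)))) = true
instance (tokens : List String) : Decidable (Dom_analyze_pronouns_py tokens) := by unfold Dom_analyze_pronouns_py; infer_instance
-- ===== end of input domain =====

-- B replaces A's three membership scans over the token list with one pronoun→category
-- lookup table built once and a single counting pass (objective: simpler).

-- ===== PORT A =====
def firstPersonList : List String := ["i", "me", "my", "mine", "we", "us", "our", "ours"]
def secondPersonList : List String := ["you", "your", "yours"]
def thirdPersonList : List String := ["he", "she", "it", "they", "him", "her", "them", "his", "her", "their", "theirs"]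

def analyze_pronouns_py (tokens : List String) : List (String × Int) :=
  let first_count : Int := tokens.foldl (fun acc t => if t ∈ firstPersonList then acc + 1 else acc) 0
  let second_count : Int := tokens.foldl (fun acc t => if t ∈ secondPersonList then acc + 1 else acc) 0
  let third_count : Int := tokens.foldl (fun acc t => if t ∈ thirdPersonList then acc + 1 else acc) 0
  let total_pronouns := first_count + second_count + third_count
  [("first_person_count", first_count), ("second_person_count", second_count),
   ("third_person_count", third_count), ("total_pronouns", total_pronouns)]

-- ===== PORT B =====
-- the lookup table, built once (Source B's three table-building loops)
def pronounCategory : PySem.Dict String String :=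
  let d := (["i", "me", "my", "mine", "we", "us", "our", "ours"] : List String).foldl
             (fun d p => d.insert p "first") PySem.Dict.empty
  let d := (["you", "your", "yours"] : List String).foldl (fun d p => d.insert p "second") d
  (["he", "she", "it", "they", "him", "her", "them", "his", "their", "theirs"] : List String).foldl
    (fun d p => d.insert p "third") d

-- the loop body of Source B's single pass
def pronounStep (acc : Int × Int × Int) (t : String) : Int × Int × Int :=
  match pronounCategory.get? t with
  | some "first" => (acc.1 + 1, acc.2.1, acc.2.2)
  | some "second" => (acc.1, acc.2.1 + 1, acc.2.2)
  | some "third" => (acc.1, acc.2.1, acc.2.2 + 1)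
  | _ => acc

def analyze_pronouns_py_alt (tokens : List String) : List (String × Int) :=
  let c := tokens.foldl pronounStep (0, 0, 0)
  [("first_person_count", c.1), ("second_person_count", c.2.1),
   ("third_person_count", c.2.2), ("total_pronouns", c.1 + c.2.1 + c.2.2)]

-- ===== PRECONDITION & SPEC =====
def Spec_analyze_pronouns_py (tokens : List String) (out : List (String × Int)) : Prop := out = analyze_pronouns_py_alt tokens
instance (tokens : List String) (out : List (String × Int)) : Decidable (Spec_analyze_pronouns_py tokens out) := by unfold Spec_analyze_pronouns_py; infer_instance

-- ===== CLAIM (what is proved, stated in full; the proofs are below) =====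
def Claim_equal_analyze_pronouns_py : Prop := ∀ (tokens : List String), Dom_analyze_pronouns_py tokens → Spec_analyze_pronouns_py tokens (analyze_pronouns_py tokens)

-- ===== LEMMAS AND PROOFS =====

-- the fully-built table as a literal
lemma pronounCategory_eq : pronounCategory = PySem.Dict.mk
    [("i", "first"), ("me", "first"), ("my", "first"), ("mine", "first"),
     ("we", "first"), ("us", "first"), ("our", "first"), ("ours", "first"),
     ("you", "second"), ("your", "second"), ("yours", "second"),
     ("he", "third"), ("she", "third"), ("it", "third"), ("they", "third"),
     ("him", "third"), ("her", "third"), ("them", "third"), ("his", "third"),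
     ("their", "third"), ("theirs", "third")] := by decide

lemma cat_first {t : String} (h : t ∈ firstPersonList) : pronounCategory.get? t = some "first" := by
  fin_cases h <;> decide

lemma cat_second {t : String} (h : t ∈ secondPersonList) : pronounCategory.get? t = some "second" := by
  fin_cases h <;> decide

lemma cat_third {t : String} (h : t ∈ thirdPersonList) : pronounCategory.get? t = some "third" := by
  fin_cases h <;> decide

lemma cat_none {t : String} (h1 : t ∉ firstPersonList) (h2 : t ∉ secondPersonList)
    (h3 : t ∉ thirdPersonList) : pronounCategory.get? t = none := by
  rw [pronounCategory_eq, PySem.Dict.get?_eq_none_iff_not_mem_keys]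
  simp only [firstPersonList, secondPersonList, thirdPersonList, List.mem_cons,
    List.not_mem_nil, or_false, not_or] at h1 h2 h3
  simp [PySem.Dict.keys_mk]
  tauto

lemma first_not_other {t : String} (h : t ∈ firstPersonList) :
    t ∉ secondPersonList ∧ t ∉ thirdPersonList := by fin_cases h <;> decide

lemma second_not_other {t : String} (h : t ∈ secondPersonList) :
    t ∉ firstPersonList ∧ t ∉ thirdPersonList := by fin_cases h <;> decide

-- loop invariant: B's single pass counts membership in each of A's three lists
lemma loopB (l : List String) : ∀ (f s th : Int),
    l.foldl pronounStep (f, s, th) =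
      (f + (l.countP (fun t => decide (t ∈ firstPersonList)) : Int),
       s + (l.countP (fun t => decide (t ∈ secondPersonList)) : Int),
       th + (l.countP (fun t => decide (t ∈ thirdPersonList)) : Int)) := by
  induction l with
  | nil => intro f s th; simp
  | cons t rest ih =>
    intro f s th
    simp only [List.foldl_cons, List.countP_cons]
    by_cases h1 : t ∈ firstPersonList
    · obtain ⟨h2, h3⟩ := first_not_other h1
      simp only [pronounStep, cat_first h1, ih, h1, h2, h3]
      simp; ring
    · by_cases h2 : t ∈ secondPersonList
      · obtain ⟨_, h3⟩ := second_not_other h2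
        simp only [pronounStep, cat_second h2, ih, h1, h2, h3]
        simp; ring
      · by_cases h3 : t ∈ thirdPersonList
        · simp only [pronounStep, cat_third h3, ih, h1, h2, h3]
          simp; ring
        · simp only [pronounStep, cat_none h1 h2 h3, ih, h1, h2, h3]
          simp

-- ===== VERDICT (by name: the statement is the Claim_ definition above) =====
theorem analyze_pronouns_py_spec : Claim_equal_analyze_pronouns_py := by
  intro tokens _
  unfold Spec_analyze_pronouns_py analyze_pronouns_py analyze_pronouns_py_alt
  rw [loopB]
  simp [PySem.List.foldl_ite_add_one]
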